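-- pv_equiv track=rewrite | github.com/lollipop690/SC1003-Mini-Project | assets/algorithms/GPAoptimized.py | diversity_score
-- ===== SOURCE A (Python) =====
-- def diversity_score(team): #grades how diverse each group is(lower better)
--     score = 0
--     gender_counts = {}
--     school_counts = {}
--
--     for student in team:
--         gender_counts[student['Gender']] = gender_counts.get(student['Gender'], 0) + 1
--         school_counts[student['School']] = school_counts.get(student['School'], 0) + 1
--
--     for count in gender_counts.values():
--         if count >= 3:
--             score += (count - 2) * 10 #every 3rd person onwards of the same gender will add 10 to the diversity score
--
--     for count in school_counts.values():
--         if count >= 2: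
--             score += (count - 2) * 10 #every 2nd person onwards of the same school will add 10 to the diversity score
--
--     return score
-- ===== SOURCE B (Python) =====
-- def diversity_score(team):
--     # single pass: add 10 as soon as a gender/school count reaches 3, 4, ...
--     score = 0
--     gender_counts = {}
--     school_counts = {}
--     for student in team:
--         g = student['Gender']
--         s = student['School']
--         gender_counts[g] = gender_counts.get(g, 0) + 1
--         if gender_counts[g] >= 3:
--             score += 10
--         school_counts[s] = school_counts.get(s, 0) + 1
--         if school_counts[s] >= 3:
--             score += 10
--     return score
-- ===== Notes on version B (the rewrite author's own statement) =====
-- stated objective: simpler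
-- what changed: Replaced the count-then-sum-over-two-dicts structure by a single incremental pass that adds 10 the moment a gender or school count reaches 3 (and each time after), eliminating both trailing summation loops.
import Mathlib
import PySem

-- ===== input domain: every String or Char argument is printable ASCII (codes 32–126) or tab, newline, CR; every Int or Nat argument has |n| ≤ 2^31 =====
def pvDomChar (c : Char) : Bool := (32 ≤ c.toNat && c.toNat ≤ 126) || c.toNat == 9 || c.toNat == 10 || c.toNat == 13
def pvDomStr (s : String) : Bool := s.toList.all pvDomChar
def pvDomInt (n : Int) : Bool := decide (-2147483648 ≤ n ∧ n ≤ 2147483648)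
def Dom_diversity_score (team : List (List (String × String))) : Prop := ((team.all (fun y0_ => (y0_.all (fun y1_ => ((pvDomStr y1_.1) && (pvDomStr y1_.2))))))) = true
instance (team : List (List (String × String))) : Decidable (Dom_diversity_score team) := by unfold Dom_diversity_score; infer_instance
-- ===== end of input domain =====

-- B replaces A's count-then-sum-over-dict-values structure by a single incremental pass
-- (add 10 whenever a gender/school count reaches 3 or more); same O(n) cost, no trailing loops.

-- student['Gender'] / student['School']: first-match lookup; none = KeyError, excluded by Pre_
def pyKey (student : List (String × String)) (k : String) : String :=
  ((PySem.Dict.mk student).get? k).getD ""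

-- ===== PORT A =====
-- loop body of A's counting pass
def stepA (p : PySem.Dict String Int × PySem.Dict String Int)
    (student : List (String × String)) :
    PySem.Dict String Int × PySem.Dict String Int :=
  let g := pyKey student "Gender"
  let s := pyKey student "School"
  (p.1.insert g (p.1.getD g 0 + 1), p.2.insert s (p.2.getD s 0 + 1))

def diversity_score (team : List (List (String × String))) : Int :=
  let counts := team.foldl stepA (PySem.Dict.empty, PySem.Dict.empty)
  let score1 := counts.1.values.foldl
    (fun score c => if c ≥ 3 then score + (c - 2) * 10 else score) 0
  counts.2.values.foldl
    (fun score c => if c ≥ 2 then score + (c - 2) * 10 else score) score1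

-- ===== PORT B =====
def diversity_score_alt (team : List (List (String × String))) : Int :=
  (team.foldl
    (fun (st : Int × PySem.Dict String Int × PySem.Dict String Int) student =>
      let g := pyKey student "Gender"
      let s := pyKey student "School"
      let gc := st.2.1.insert g (st.2.1.getD g 0 + 1)
      let score1 := if gc.getD g 0 ≥ 3 then st.1 + 10 else st.1
      let sc := st.2.2.insert s (st.2.2.getD s 0 + 1)
      let score2 := if sc.getD s 0 ≥ 3 then score1 + 10 else score1
      (score2, gc, sc))
    (0, PySem.Dict.empty, PySem.Dict.empty)).1

-- ===== PRECONDITION & SPEC =====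
-- Pre_ excludes exactly the students lacking a 'Gender' or 'School' key, on which the Python raises KeyError.
def Pre_diversity_score (team : List (List (String × String))) : Prop :=
  (team.all (fun student =>
    (PySem.Dict.mk student).contains "Gender" && (PySem.Dict.mk student).contains "School")) = true
instance (team : List (List (String × String))) : Decidable (Pre_diversity_score team) := by
  unfold Pre_diversity_score; infer_instance

def pvWitness_diversity_score : (List (List (String × String))) :=
  [[("Gender", "M"), ("School", "SCSE")], [("Gender", "F"), ("School", "SCSE")]]

def Spec_diversity_score (team : List (List (String × String))) (out : Int) : Prop := out = diversity_score_alt team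
instance (team : List (List (String × String))) (out : Int) : Decidable (Spec_diversity_score team out) := by unfold Spec_diversity_score; infer_instance

-- ===== CLAIM (what is proved, stated in full; the proofs are below) =====
def Claim_equal_diversity_score : Prop := ∀ (team : List (List (String × String))), Dom_diversity_score team → Pre_diversity_score team → Spec_diversity_score team (diversity_score team)

-- ===== LEMMAS AND PROOFS =====

-- penalty one count contributes to the final score
def contrib (c : Int) : Int := if c ≥ 3 then (c - 2) * 10 else 0

def penL (l : List (String × Int)) : Int := (l.map (fun p => contrib p.2)).sum

def pen (d : PySem.Dict String Int) : Int := penL d.items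

lemma contrib_succ (c : Int) :
    contrib (c + 1) = contrib c + (if c + 1 ≥ 3 then (10 : Int) else 0) := by
  unfold contrib; split_ifs <;> omega

lemma ite_ge3 (c x : Int) :
    (if c ≥ 3 then x + (c - 2) * 10 else x) = x + contrib c := by
  unfold contrib; split_ifs <;> omega

lemma ite_ge2 (c x : Int) :
    (if c ≥ 2 then x + (c - 2) * 10 else x) = x + contrib c := by
  unfold contrib; split_ifs <;> omega

lemma penL_update (l : List (String × Int)) (k : String) (c v : Int)
    (hnd : (l.map Prod.fst).Nodup) (hmem : (k, c) ∈ l) :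
    penL (l.map (fun p => if p.1 == k then (k, v) else p)) =
      penL l - contrib c + contrib v := by
  induction l with
  | nil => simp at hmem
  | cons p rest ih =>
    simp only [List.map_cons, List.nodup_cons, List.mem_map] at hnd
    rcases List.mem_cons.mp hmem with h | h
    · have hp : p = (k, c) := h.symm
      subst hp
      have hrest : rest.map (fun p => if p.1 == k then (k, v) else p) = rest := by
        rw [show rest = rest.map id by simp]
        rw [List.map_map]
        apply List.map_congr_left
        intro q hq
        have hqk : q.1 ≠ k := by
          intro hqk
          exact hnd.1 ⟨q, by simpa using hq, hqk⟩
        simp [hqk]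
      simp only [penL, List.map_cons, List.sum_cons, beq_self_eq_true, if_pos, hrest]
      ring
    · have hpk : ¬ ((p.1 == k) = true) := by
        simp only [beq_iff_eq]
        intro hpk
        exact hnd.1 ⟨(k, c), h, by simp [hpk]⟩
      have ih' := ih hnd.2 h
      unfold penL at ih' ⊢
      simp only [List.map_cons, List.sum_cons, if_neg hpk]
      rw [ih']
      ring

lemma pen_insert (d : PySem.Dict String Int) (k : String) (hnd : d.keys.Nodup) :
    pen (d.insert k (d.getD k 0 + 1)) =
      pen d + (if d.getD k 0 + 1 ≥ 3 then (10 : Int) else 0) := by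
  have hnd' : (d.items.map Prod.fst).Nodup := hnd
  by_cases h : d.contains k = true
  · obtain ⟨c, hc⟩ : ∃ c, d.get? k = some c := by
      have := PySem.Dict.contains_eq_isSome_get? d k
      rw [h] at this
      exact Option.isSome_iff_exists.mp this.symm
    have hgetD : d.getD k 0 = c := PySem.Dict.getD_of_get?_eq_some d 0 hc
    have hmem : (k, c) ∈ d.items := PySem.Dict.mem_items_of_get?_eq_some d hc
    unfold pen
    rw [PySem.Dict.items_insert_of_contains d _ h, hgetD,
        penL_update d.items k c (c + 1) hnd' hmem, contrib_succ]
    ring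
  · have h' : d.contains k = false := by simpa using h
    have hgetD : d.getD k 0 = 0 := PySem.Dict.getD_of_not_contains d 0 h'
    unfold pen penL
    rw [PySem.Dict.items_insert_of_not_contains d _ h', hgetD]
    simp [contrib]

lemma foldl_ge3 (l : List Int) (init : Int) :
    l.foldl (fun score c => if c ≥ 3 then score + (c - 2) * 10 else score) init =
      init + (l.map contrib).sum := by
  induction l generalizing init with
  | nil => simp
  | cons c rest ih =>
    rw [List.foldl_cons, ite_ge3, ih, List.map_cons, List.sum_cons]
    ring

lemma foldl_ge2 (l : List Int) (init : Int) :
    l.foldl (fun score c => if c ≥ 2 then score + (c - 2) * 10 else score) init =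
      init + (l.map contrib).sum := by
  induction l generalizing init with
  | nil => simp
  | cons c rest ih =>
    rw [List.foldl_cons, ite_ge2, ih, List.map_cons, List.sum_cons]
    ring

lemma pen_eq_values_sum (d : PySem.Dict String Int) :
    (d.values.map contrib).sum = pen d := by
  unfold pen penL
  rw [show d.values = d.items.map (fun p => p.2) from rfl, List.map_map]
  rfl

lemma main_inv (team : List (List (String × String))) :
    ∀ (score : Int) (gc sc : PySem.Dict String Int),
    gc.keys.Nodup → sc.keys.Nodup →
    (team.foldl
      (fun (st : Int × PySem.Dict String Int × PySem.Dict String Int) student =>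
        let g := pyKey student "Gender"
        let s := pyKey student "School"
        let gc := st.2.1.insert g (st.2.1.getD g 0 + 1)
        let score1 := if gc.getD g 0 ≥ 3 then st.1 + 10 else st.1
        let sc := st.2.2.insert s (st.2.2.getD s 0 + 1)
        let score2 := if sc.getD s 0 ≥ 3 then score1 + 10 else score1
        (score2, gc, sc))
      (score, gc, sc)).1 =
    score + (pen (team.foldl stepA (gc, sc)).1 - pen gc)
          + (pen (team.foldl stepA (gc, sc)).2 - pen sc) := by
  induction team with
  | nil => intro score gc sc _ _; simp
  | cons student rest ih =>
    intro score gc sc hgc hsc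
    simp only [List.foldl_cons]
    set g := pyKey student "Gender" with hg
    set s := pyKey student "School" with hs
    have hgc' : (gc.insert g (gc.getD g 0 + 1)).keys.Nodup :=
      PySem.Dict.nodup_keys_insert _ _ _ hgc
    have hsc' : (sc.insert s (sc.getD s 0 + 1)).keys.Nodup :=
      PySem.Dict.nodup_keys_insert _ _ _ hsc
    rw [show stepA (gc, sc) student =
          (gc.insert g (gc.getD g 0 + 1), sc.insert s (sc.getD s 0 + 1)) from rfl]
    show (rest.foldl _ (_, gc.insert g (gc.getD g 0 + 1), sc.insert s (sc.getD s 0 + 1))).1 = _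
    rw [ih _ _ _ hgc' hsc']
    rw [pen_insert gc g hgc, pen_insert sc s hsc,
        PySem.Dict.getD_insert_self, PySem.Dict.getD_insert_self]
    split_ifs <;> ring

-- ===== VERDICT (by name: the statement is the Claim_ definition above) =====
theorem diversity_score_spec : Claim_equal_diversity_score := by
  intro team _ _
  show diversity_score team = diversity_score_alt team
  have hB : diversity_score_alt team =
      0 + (pen (team.foldl stepA (PySem.Dict.empty, PySem.Dict.empty)).1 - pen PySem.Dict.empty)
        + (pen (team.foldl stepA (PySem.Dict.empty, PySem.Dict.empty)).2 - pen PySem.Dict.empty) :=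
    main_inv team 0 PySem.Dict.empty PySem.Dict.empty
      PySem.Dict.nodup_keys_empty PySem.Dict.nodup_keys_empty
  have hA : diversity_score team =
      (team.foldl stepA (PySem.Dict.empty, PySem.Dict.empty)).2.values.foldl
        (fun score c => if c ≥ 2 then score + (c - 2) * 10 else score)
        ((team.foldl stepA (PySem.Dict.empty, PySem.Dict.empty)).1.values.foldl
          (fun score c => if c ≥ 3 then score + (c - 2) * 10 else score) 0) := rfl
  rw [hA, hB, foldl_ge2, foldl_ge3, pen_eq_values_sum, pen_eq_values_sum]
  have hpenE : pen (PySem.Dict.empty : PySem.Dict String Int) = 0 := rfl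
  rw [hpenE]
  ring
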